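-- pv_equiv track=rewrite | github.com/yoursc/adventofcode | 2021/08/2021-08.py | str_sort
-- ===== SOURCE A (Python) =====
-- def str_sort(str_random):
--     tmp = ""
--     for a in 'abcdefg':
--         if str_random.count(a) > 1:
--             raise
--         elif str_random.count(a) == 1:
--             tmp += a
--     return tmp
-- ===== SOURCE B (Python) =====
-- def str_sort(str_random):
--     filtered = [c for c in str_random if c in 'abcdefg']
--     if len(filtered) != len(set(filtered)):
--         raise
--     return ''.join(sorted(set(filtered)))
-- ===== Notes on version B (the rewrite author's own statement) =====
-- stated objective: alternative
-- what changed: Replaces A's seven per-letter count scans over the whole string by one pass collecting alphabet letters, a duplicate check, and a sort of the distinct collected letters.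
import Mathlib
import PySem

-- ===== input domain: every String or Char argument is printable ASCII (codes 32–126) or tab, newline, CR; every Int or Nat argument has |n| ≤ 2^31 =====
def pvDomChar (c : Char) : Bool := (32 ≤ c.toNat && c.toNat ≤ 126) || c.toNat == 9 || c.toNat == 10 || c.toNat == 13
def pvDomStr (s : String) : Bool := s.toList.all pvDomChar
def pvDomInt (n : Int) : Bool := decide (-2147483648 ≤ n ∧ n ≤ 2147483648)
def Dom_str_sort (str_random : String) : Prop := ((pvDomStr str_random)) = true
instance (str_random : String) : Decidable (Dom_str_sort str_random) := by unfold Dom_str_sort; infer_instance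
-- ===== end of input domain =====

-- B replaces A's seven per-letter count scans by one collect pass, a duplicate check and a
-- sort of the distinct collected letters (alternative decomposition; both raise on a
-- duplicated alphabet letter, excluded by Pre_).

-- ===== PORT A =====
def str_sort (str_random : String) : String :=
  "abcdefg".toList.foldl (fun tmp a =>
    if PySem.Str.count str_random (String.ofList [a]) > 1 then tmp  -- Python: bare raise (outside Pre_)
    else if PySem.Str.count str_random (String.ofList [a]) = 1 then tmp ++ String.ofList [a]
    else tmp) ""

-- ===== PORT B =====
-- 'c in "abcdefg"' for a single character c is membership of that character.
def str_sort_alt (str_random : String) : String :=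
  let filtered := str_random.toList.filter (fun c => decide (c ∈ "abcdefg".toList))
  if filtered.length ≠ (PySem.Set.ofList filtered).length then ""  -- Python: bare raise (outside Pre_)
  else String.ofList (PySem.List.sorted (PySem.Set.ofList filtered) (fun x => x) false)

-- ===== PRECONDITION & SPEC =====
-- Pre_ excludes exactly the strings containing some letter of 'abcdefg' more than once:
-- there both A and B execute a bare 'raise' (RuntimeError).
def Pre_str_sort (str_random : String) : Prop :=
  ("abcdefg".toList.all (fun c => decide (str_random.toList.count c ≤ 1))) = true

instance (str_random : String) : Decidable (Pre_str_sort str_random) := by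
  unfold Pre_str_sort; infer_instance

def pvWitness_str_sort : String := "gxa b"

def Spec_str_sort (str_random : String) (out : String) : Prop := out = str_sort_alt str_random
instance (str_random : String) (out : String) : Decidable (Spec_str_sort str_random out) := by unfold Spec_str_sort; infer_instance

-- ===== CLAIM (what is proved, stated in full; the proofs are below) =====
def Claim_equal_str_sort : Prop := ∀ (str_random : String), Dom_str_sort str_random → Pre_str_sort str_random → Spec_str_sort str_random (str_sort str_random)

-- ===== LEMMAS AND PROOFS =====

-- s.count(c) for a one-character needle is the character count.
theorem chars_count_go_singleton (c : Char) (l : List Char) (fuel acc : Nat)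
    (h : l.length ≤ fuel) :
    PySem.Chars.count.go [c] fuel l acc = acc + l.count c := by
  induction l generalizing fuel acc with
  | nil => cases fuel <;> simp [PySem.Chars.count.go]
  | cons x t ih =>
    cases fuel with
    | zero => simp at h
    | succ n =>
      simp only [List.length_cons, Nat.succ_le_succ_iff] at h
      by_cases hx : c = x
      · subst hx
        simp [PySem.Chars.count.go, List.isPrefixOf, ih _ _ h]
        omega
      · simp [PySem.Chars.count.go, List.isPrefixOf, Ne.symm hx, hx, ih _ _ h]

theorem chars_count_singleton (l : List Char) (c : Char) :
    PySem.Chars.count l [c] = l.count c := by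
  unfold PySem.Chars.count
  simp only [List.isEmpty_cons, Bool.false_eq_true, if_false]
  simpa using chars_count_go_singleton c l l.length 0 le_rfl

theorem str_count_singleton (s : String) (c : Char) :
    PySem.Str.count s (String.ofList [c]) = s.toList.count c := by
  rw [PySem.Str.count_eq, show (String.ofList [c]).toList = [c] from by simp]
  exact chars_count_singleton _ _

-- A's loop, under Pre_, appends exactly the letters of the alphabet present in s, in loop order.
theorem foldA (s : List Char) (l : List Char) (acc : String)
    (h : ∀ a ∈ l, s.count a ≤ 1) :
    l.foldl (fun tmp a =>
      if s.count a > 1 then tmp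
      else if s.count a = 1 then tmp ++ String.ofList [a]
      else tmp) acc
    = acc ++ String.ofList (l.filter (fun a => decide (a ∈ s))) := by
  induction l generalizing acc with
  | nil =>
    refine String.toList_inj.mp ?_
    simp
  | cons x t ih =>
    have hx : s.count x ≤ 1 := h x (by simp)
    have ht : ∀ a ∈ t, s.count a ≤ 1 := fun a ha => h a (by simp [ha])
    by_cases hm : x ∈ s
    · have h1 : s.count x = 1 := Nat.le_antisymm hx (List.count_pos_iff.mpr hm)
      simp only [List.foldl_cons, h1]
      norm_num
      rw [ih _ ht]
      refine String.toList_inj.mp ?_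
      simp [hm]
    · have h0 : s.count x = 0 := List.count_eq_zero.mpr hm
      simp only [List.foldl_cons, h0]
      norm_num
      rw [ih _ ht]
      refine String.toList_inj.mp ?_
      simp [hm]

theorem alpha_nodup : ("abcdefg".toList).Nodup := by decide

theorem alpha_sorted : ("abcdefg".toList).Pairwise (fun a b : Char => a < b) := by decide

theorem str_sort_spec : Claim_equal_str_sort := by
  unfold Claim_equal_str_sort
  intro s _ hpre
  unfold Spec_str_sort str_sort str_sort_alt Pre_str_sort at *
  have hcnt : ∀ a ∈ ("abcdefg".toList), s.toList.count a ≤ 1 := by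
    intro a ha
    simpa using List.all_eq_true.mp hpre a ha
  simp only [str_count_singleton]
  rw [foldA s.toList _ "" hcnt]
  set filtered := s.toList.filter (fun c => decide (c ∈ "abcdefg".toList)) with hf
  have hnd : filtered.Nodup := by
    rw [List.nodup_iff_count_le_one]
    intro a
    by_cases hm : a ∈ ("abcdefg".toList)
    · exact le_trans (List.Sublist.count_le a List.filter_sublist) (hcnt a hm)
    · have hnin : a ∉ filtered := fun hin => hm (by simpa using (List.mem_filter.mp hin).2)
      simp [List.count_eq_zero.mpr hnin]
  have hperm : filtered.Perm (PySem.Set.ofList filtered) := by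
    rw [List.perm_ext_iff_of_nodup hnd (PySem.Set.nodup_ofList _)]
    intro a; simp [PySem.Set.mem_ofList]
  have hlen : ¬ filtered.length ≠ (PySem.Set.ofList filtered).length := by
    simpa using hperm.length_eq
  rw [if_neg hlen]
  have hys : ("abcdefg".toList.filter (fun a => decide (a ∈ s.toList))).Perm
      (PySem.Set.ofList filtered) := by
    rw [List.perm_ext_iff_of_nodup (alpha_nodup.filter _) (PySem.Set.nodup_ofList _)]
    intro a
    simp only [PySem.Set.mem_ofList, hf, List.mem_filter, decide_eq_true_eq]
    exact ⟨fun ⟨h1, h2⟩ => ⟨h2, h1⟩, fun ⟨h1, h2⟩ => ⟨h2, h1⟩⟩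
  have hlt : ("abcdefg".toList.filter (fun a => decide (a ∈ s.toList))).Pairwise
      (fun a b : Char => (fun x : Char => x) a < (fun x : Char => x) b) :=
    alpha_sorted.filter _
  refine String.toList_inj.mp ?_
  rw [String.toList_append]
  simp only [String.toList_ofList, show ("" : String).toList = [] from by simp, List.nil_append]
  exact (PySem.List.sorted_eq_of_perm_of_pairwise_lt _ _ (fun x : Char => x) hys hlt).symm
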